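-- pv_equiv track=rewrite | github.com/gillisandrew/linked-past | packages/linked-past-store/linked_past_store/pull.py | _classify_changes
-- ===== SOURCE A (Python) =====
-- def _classify_changes(
--     old_layers: dict[str, str],
--     new_layers: dict[str, str],
-- ) -> str:
--     """Classify what changed between two manifest layer sets.
--
--     Args:
--         old_layers: {filename: digest} from old manifest
--         new_layers: {filename: digest} from new manifest
--
--     Returns:
--         "data" if any non-sidecar file changed or was added/removed,
--         "sidecar" if only _-prefixed files changed,
--         "none" if nothing changed.
--     """
--     all_files = set(old_layers) | set(new_layers)
--     data_changed = False
--     sidecar_changed = False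
--
--     for filename in all_files:
--         old_digest = old_layers.get(filename)
--         new_digest = new_layers.get(filename)
--         if old_digest != new_digest:
--             if filename.startswith("_"):
--                 sidecar_changed = True
--             else:
--                 data_changed = True
--
--     if data_changed:
--         return "data"
--     if sidecar_changed:
--         return "sidecar"
--     return "none"
-- ===== SOURCE B (Python) =====
-- def _classify_changes(
--     old_layers: dict[str, str],
--     new_layers: dict[str, str],
-- ) -> str:
--     """Split each manifest into its data and sidecar partitions and
--     compare the partitions wholesale as dicts."""
--
--     def part(layers: dict[str, str], sidecar: bool) -> dict[str, str]:
--         return {f: d for f, d in layers.items() if f.startswith("_") == sidecar}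
--
--     if part(old_layers, False) != part(new_layers, False):
--         return "data"
--     if part(old_layers, True) != part(new_layers, True):
--         return "sidecar"
--     return "none"
-- ===== Notes on version B (the rewrite author's own statement) =====
-- stated objective: alternative
-- what changed: Instead of scanning the union of keys once with two mutable flags, B splits each manifest into its sidecar and non-sidecar partitions via dict comprehensions and compares the partitions wholesale with dict equality.
import Mathlib
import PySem

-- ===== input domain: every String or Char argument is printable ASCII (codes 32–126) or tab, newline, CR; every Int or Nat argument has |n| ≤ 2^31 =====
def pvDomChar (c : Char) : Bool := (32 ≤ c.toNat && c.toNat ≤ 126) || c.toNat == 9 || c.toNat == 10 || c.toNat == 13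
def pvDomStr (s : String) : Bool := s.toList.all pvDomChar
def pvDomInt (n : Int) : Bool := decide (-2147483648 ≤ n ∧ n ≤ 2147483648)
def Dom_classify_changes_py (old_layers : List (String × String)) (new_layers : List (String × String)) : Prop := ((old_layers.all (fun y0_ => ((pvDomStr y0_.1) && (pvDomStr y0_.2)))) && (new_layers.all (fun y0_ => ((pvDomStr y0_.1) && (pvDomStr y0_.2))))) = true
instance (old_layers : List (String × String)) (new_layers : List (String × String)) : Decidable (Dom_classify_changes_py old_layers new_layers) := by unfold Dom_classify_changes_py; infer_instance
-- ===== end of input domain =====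

-- B replaces A's single scan over the union of keys with two mutable flags by splitting each
-- manifest into its sidecar / non-sidecar partition and comparing the partitions wholesale as
-- dicts (objective: alternative; return value only).

-- ===== PORT A =====
def classify_changes_py (old_layers : List (String × String)) (new_layers : List (String × String)) : String :=
  let od := PySem.Dict.ofList old_layers
  let nd := PySem.Dict.ofList new_layers
  let all_files : PySem.Set String := PySem.Set.union (PySem.Set.ofList od.keys) nd.keys
  -- flags (data_changed, sidecar_changed); the fold over the set is order-independent
  let flags := all_files.foldl
    (fun (acc : Bool × Bool) filename =>
      if od.get? filename ≠ nd.get? filename then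
        if PySem.Str.startswith filename "_" then (acc.1, true) else (true, acc.2)
      else acc)
    (false, false)
  if flags.1 then "data" else if flags.2 then "sidecar" else "none"

-- ===== PORT B =====
-- the dict comprehension {f: d for f, d in layers.items() if f.startswith("_") == sidecar}
def dictPart (layers : PySem.Dict String String) (sidecar : Bool) : PySem.Dict String String :=
  PySem.Dict.ofList (layers.items.filter (fun fd => PySem.Str.startswith fd.1 "_" == sidecar))

-- Python's dict '==' ignores insertion order: exact as mutual key/value containment
def dictEq (d1 d2 : PySem.Dict String String) : Bool :=
  d1.items.all (fun fd => d2.get? fd.1 == some fd.2) &&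
  d2.items.all (fun fd => d1.get? fd.1 == some fd.2)

def classify_changes_py_alt (old_layers : List (String × String)) (new_layers : List (String × String)) : String :=
  let od := PySem.Dict.ofList old_layers
  let nd := PySem.Dict.ofList new_layers
  if !(dictEq (dictPart od false) (dictPart nd false)) then "data"
  else if !(dictEq (dictPart od true) (dictPart nd true)) then "sidecar"
  else "none"

-- ===== PRECONDITION & SPEC =====
def Spec_classify_changes_py (old_layers : List (String × String)) (new_layers : List (String × String)) (out : String) : Prop := out = classify_changes_py_alt old_layers new_layers
instance (old_layers : List (String × String)) (new_layers : List (String × String)) (out : String) : Decidable (Spec_classify_changes_py old_layers new_layers out) := by unfold Spec_classify_changes_py; infer_instance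

-- ===== CLAIM (what is proved, stated in full; the proofs are below) =====
def Claim_equal_classify_changes_py : Prop := ∀ (old_layers : List (String × String)) (new_layers : List (String × String)), Dom_classify_changes_py old_layers new_layers → Spec_classify_changes_py old_layers new_layers (classify_changes_py old_layers new_layers)

-- ===== LEMMAS AND PROOFS =====

-- The two flags of A's fold record "some changed file is non-sidecar / is sidecar".
lemma flags_foldl (od nd : PySem.Dict String String) (s : List String) (a b : Bool) :
    s.foldl
      (fun (acc : Bool × Bool) filename =>
        if od.get? filename ≠ nd.get? filename then
          if PySem.Str.startswith filename "_" then (acc.1, true) else (true, acc.2)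
        else acc)
      (a, b)
    = (a || s.any (fun f => decide (od.get? f ≠ nd.get? f) && !PySem.Str.startswith f "_"),
       b || s.any (fun f => decide (od.get? f ≠ nd.get? f) && PySem.Str.startswith f "_")) := by
  induction s generalizing a b with
  | nil => simp
  | cons x xs ih =>
    rw [List.foldl_cons]
    by_cases hP : od.get? x ≠ nd.get? x
    · rw [if_pos hP]
      cases hq : PySem.Str.startswith x "_"
      · rw [if_neg Bool.false_ne_true, ih, List.any_cons, List.any_cons,
          hq, decide_eq_true hP]
        simp
      · rw [if_pos rfl, ih, List.any_cons, List.any_cons, hq, decide_eq_true hP]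
        simp
    · rw [if_neg hP, ih, List.any_cons, List.any_cons, decide_eq_false hP]
      simp

-- A differing filename is in A's union of key sets.
lemma mem_all_files (od nd : PySem.Dict String String) (f : String)
    (h : od.get? f ≠ nd.get? f) :
    f ∈ PySem.Set.union (PySem.Set.ofList od.keys) nd.keys := by
  rw [PySem.Set.mem_union, PySem.Set.mem_ofList]
  cases ho : od.get? f with
  | some v =>
    left
    by_contra hk
    exact Option.some_ne_none v (ho.symm.trans ((PySem.Dict.get?_eq_none_iff_not_mem_keys od f).2 hk))
  | none =>
    right
    by_contra hk
    exact h (ho.trans ((PySem.Dict.get?_eq_none_iff_not_mem_keys nd f).2 hk).symm)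

-- ofList of a list with distinct keys keeps its items unchanged.
lemma items_ofList_nodup (l : List (String × String)) (h : (l.map Prod.fst).Nodup) :
    (PySem.Dict.ofList l).items = l := by
  have := PySem.Dict.items_foldl_insert_fresh (κ := String) (ν := String) l Prod.fst Prod.snd
    PySem.Dict.empty (by intro a _; simp) h
  simpa [PySem.Dict.ofList, PySem.Dict.update] using this

-- dictPart's items are the filtered items of the input dict.
lemma items_dictPart (d : PySem.Dict String String) (hd : d.keys.Nodup) (s : Bool) :
    (dictPart d s).items = d.items.filter (fun fd => PySem.Str.startswith fd.1 "_" == s) := by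
  apply items_ofList_nodup
  exact List.Nodup.sublist (List.Sublist.map Prod.fst List.filter_sublist) hd

-- Lookup in a partition: the input's lookup on its side of the split, none on the other.
lemma get?_dictPart (d : PySem.Dict String String) (hd : d.keys.Nodup) (s : Bool) (f : String) :
    (dictPart d s).get? f =
      if PySem.Str.startswith f "_" == s then d.get? f else none := by
  have hpk : (dictPart d s).keys.Nodup := PySem.Dict.nodup_keys_ofList _
  by_cases hc : PySem.Str.startswith f "_" == s
  · rw [if_pos hc]
    cases ho : d.get? f with
    | some v =>
      rw [PySem.Dict.get?_eq_some_iff_mem_items _ _ _ hpk, items_dictPart d hd s,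
        List.mem_filter]
      exact ⟨PySem.Dict.mem_items_of_get?_eq_some _ ho, hc⟩
    | none =>
      rw [PySem.Dict.get?_eq_none_iff_not_mem_keys] at ho ⊢
      intro hmem
      apply ho
      have : f ∈ (dictPart d s).items.map Prod.fst := by
        simpa [PySem.Dict.keys] using hmem
      rcases List.mem_map.1 this with ⟨fd, hfd, rfl⟩
      rw [items_dictPart d hd s] at hfd
      exact PySem.Dict.mem_keys_of_mem_items _ (List.mem_of_mem_filter hfd)
  · rw [if_neg hc, PySem.Dict.get?_eq_none_iff_not_mem_keys]
    intro hmem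
    have : f ∈ (dictPart d s).items.map Prod.fst := by
      simpa [PySem.Dict.keys] using hmem
    rcases List.mem_map.1 this with ⟨fd, hfd, heq⟩
    rw [items_dictPart d hd s] at hfd
    exact hc (heq ▸ (List.mem_filter.1 hfd).2)

-- dictEq is extensional dict equality when both key lists are distinct.
lemma dictEq_iff (d1 d2 : PySem.Dict String String)
    (h1 : d1.keys.Nodup) (h2 : d2.keys.Nodup) :
    dictEq d1 d2 = true ↔ ∀ f, d1.get? f = d2.get? f := by
  unfold dictEq
  rw [Bool.and_eq_true, List.all_eq_true, List.all_eq_true]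
  constructor
  · rintro ⟨ha, hb⟩ f
    cases ho : d1.get? f with
    | some v =>
      have := ha (f, v) (PySem.Dict.mem_items_of_get?_eq_some _ ho)
      exact (beq_iff_eq.1 this).symm ▸ rfl
    | none =>
      cases hn : d2.get? f with
      | some w =>
        have := hb (f, w) (PySem.Dict.mem_items_of_get?_eq_some _ hn)
        rw [ho] at this
        exact absurd (beq_iff_eq.1 this) (by simp)
      | none => rfl
  · intro h
    constructor
    · intro fd hfd
      rw [beq_iff_eq, ← h fd.1]
      exact PySem.Dict.get?_of_mem_items _ (by simpa using hfd) h1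
    · intro fd hfd
      rw [beq_iff_eq, h fd.1]
      exact PySem.Dict.get?_of_mem_items _ (by simpa using hfd) h2

-- Equality of the s-partitions says exactly: no file on side s changed.
lemma dictEq_part_iff (od nd : PySem.Dict String String)
    (hod : od.keys.Nodup) (hnd : nd.keys.Nodup) (s : Bool) :
    dictEq (dictPart od s) (dictPart nd s) = true ↔
      ∀ f, PySem.Str.startswith f "_" = s → od.get? f = nd.get? f := by
  rw [dictEq_iff (dictPart od s) (dictPart nd s)
    (PySem.Dict.nodup_keys_ofList _) (PySem.Dict.nodup_keys_ofList _)]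
  constructor
  · intro h f hf
    have := h f
    rw [get?_dictPart od hod s f, get?_dictPart nd hnd s f,
      if_pos (show (PySem.Str.startswith f "_" == s) = true by rw [beq_iff_eq]; exact hf),
      if_pos (show (PySem.Str.startswith f "_" == s) = true by rw [beq_iff_eq]; exact hf)] at this
    exact this
  · intro h f
    rw [get?_dictPart od hod s f, get?_dictPart nd hnd s f]
    by_cases hc : PySem.Str.startswith f "_" == s
    · rw [if_pos hc, if_pos hc]
      exact h f (beq_iff_eq.1 hc)
    · rw [if_neg hc, if_neg hc]

-- ===== VERDICT (by name: the statement is the Claim_ definition above) =====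
theorem classify_changes_py_spec : Claim_equal_classify_changes_py := by
  intro old_layers new_layers _
  unfold Spec_classify_changes_py classify_changes_py classify_changes_py_alt
  set od := PySem.Dict.ofList old_layers with hodmk
  set nd := PySem.Dict.ofList new_layers with hndmk
  have hod : od.keys.Nodup := hodmk ▸ PySem.Dict.nodup_keys_ofList old_layers
  have hnd : nd.keys.Nodup := hndmk ▸ PySem.Dict.nodup_keys_ofList new_layers
  simp only [flags_foldl, Bool.false_or]
  -- translate all four branch conditions into statements about changed filenames
  have hAdata : ((PySem.Set.union (PySem.Set.ofList od.keys) nd.keys).any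
        (fun f => decide (od.get? f ≠ nd.get? f) && !PySem.Str.startswith f "_") = true)
      ↔ ∃ f, PySem.Str.startswith f "_" = false ∧ od.get? f ≠ nd.get? f := by
    rw [List.any_eq_true]
    constructor
    · rintro ⟨f, _, hq⟩
      rcases Bool.and_eq_true_iff.1 hq with ⟨hq1, hq2⟩
      exact ⟨f, by simpa using hq2, of_decide_eq_true hq1⟩
    · rintro ⟨f, hf, hne⟩
      refine ⟨f, mem_all_files od nd f hne, ?_⟩
      rw [Bool.and_eq_true, decide_eq_true_eq]
      exact ⟨hne, by rw [Bool.not_eq_true']; exact hf⟩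
  have hAside : ((PySem.Set.union (PySem.Set.ofList od.keys) nd.keys).any
        (fun f => decide (od.get? f ≠ nd.get? f) && PySem.Str.startswith f "_") = true)
      ↔ ∃ f, PySem.Str.startswith f "_" = true ∧ od.get? f ≠ nd.get? f := by
    rw [List.any_eq_true]
    constructor
    · rintro ⟨f, _, hq⟩
      rcases Bool.and_eq_true_iff.1 hq with ⟨hq1, hq2⟩
      exact ⟨f, hq2, of_decide_eq_true hq1⟩
    · rintro ⟨f, hf, hne⟩
      refine ⟨f, mem_all_files od nd f hne, ?_⟩
      rw [Bool.and_eq_true, decide_eq_true_eq]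
      exact ⟨hne, hf⟩
  have hB : ∀ s : Bool, ((!(dictEq (dictPart od s) (dictPart nd s))) = true)
      ↔ ∃ f, PySem.Str.startswith f "_" = s ∧ od.get? f ≠ nd.get? f := by
    intro s
    rw [Bool.not_eq_eq_eq_not, Bool.not_true, ← Bool.not_eq_true,
      dictEq_part_iff od nd hod hnd s]
    push Not
    constructor
    · rintro ⟨f, hf, hne⟩; exact ⟨f, hf, hne⟩
    · rintro ⟨f, hf, hne⟩; exact ⟨f, hf, hne⟩
  by_cases h1 : ∃ f, PySem.Str.startswith f "_" = false ∧ od.get? f ≠ nd.get? f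
  · rw [if_pos (hAdata.2 h1), if_pos ((hB false).2 h1)]
  · rw [if_neg (fun hc => h1 (hAdata.1 hc)), if_neg (fun hc => h1 ((hB false).1 hc))]
    by_cases h2 : ∃ f, PySem.Str.startswith f "_" = true ∧ od.get? f ≠ nd.get? f
    · rw [if_pos (hAside.2 h2), if_pos ((hB true).2 h2)]
    · rw [if_neg (fun hc => h2 (hAside.1 hc)), if_neg (fun hc => h2 ((hB true).1 hc))]
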